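-- pv_equiv track=rewrite | github.com/jonasrenault/advent2020 | advent2020/day06.py | group_questions
-- ===== SOURCE A (Python) =====
-- def group_questions(lines: list[str]) -> list[set[str]]:
--     qs = []
--     q = set()
--     for line in lines:
--         if not line:
--             qs.append(q)
--             q = set()
--         else:
--             q.update(line)
--     qs.append(q)
--     return qs
-- ===== SOURCE B (Python) =====
-- def group_questions(lines: list[str]) -> list[set[str]]:
--     bounds = [-1] + [i for i, line in enumerate(lines) if not line] + [len(lines)]
--     return [set().union(*lines[a + 1:b]) for a, b in zip(bounds, bounds[1:])]
-- ===== Notes on version B (the rewrite author's own statement) =====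
-- stated objective: alternative
-- what changed: B replaces A's accumulator pass (a running set flushed at each blank line) with an index-based algorithm: it computes the positions of the blank lines, forms boundary pairs [-1]+blanks+[len], and materialises each group as the slice lines[a+1:b] whose lines are unioned into a set.
import Mathlib
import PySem

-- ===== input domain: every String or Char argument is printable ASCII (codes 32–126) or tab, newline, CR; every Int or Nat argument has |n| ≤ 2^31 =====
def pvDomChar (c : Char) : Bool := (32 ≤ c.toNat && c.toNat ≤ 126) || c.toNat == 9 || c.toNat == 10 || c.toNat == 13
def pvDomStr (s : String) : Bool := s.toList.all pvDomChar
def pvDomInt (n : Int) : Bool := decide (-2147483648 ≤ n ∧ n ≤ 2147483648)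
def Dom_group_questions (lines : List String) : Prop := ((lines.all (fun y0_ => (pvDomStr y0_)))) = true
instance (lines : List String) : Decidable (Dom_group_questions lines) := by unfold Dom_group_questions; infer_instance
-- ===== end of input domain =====

-- B is an index-based re-implementation: it first computes the positions of the blank
-- lines, then materialises each group as a SLICE of the input between consecutive
-- boundary indices and unions its lines; A instead runs one accumulator pass flushing
-- a running set at each blank line. Alternative algorithm, same cost.

-- ===== PORT A =====
-- single pass: running set q, flushed to qs on each blank line and once at the end
def group_questions (lines : List String) : List (List String) :=
  let s := lines.foldl
    (fun (st : List (List String) × List String) line =>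
      if line = "" then (st.1 ++ [st.2], PySem.Set.empty)
      else (st.1, PySem.Set.update st.2 (line.toList.map (fun c => String.mk [c]))))
    ([], PySem.Set.empty)
  s.1 ++ [s.2]

-- ===== PORT B =====
-- bounds = [-1] + [indices of blank lines] + [len]; each group is the slice
-- lines[a+1:b] for consecutive (a, b), turned into set().union(*slice)
def group_questions_alt (lines : List String) : List (List String) :=
  let bounds : List Int :=
    [(-1 : Int)]
      ++ ((PySem.List.enumerate lines 0).filter (fun p => p.2 = "")).map (fun p => p.1)
      ++ [(lines.length : Int)]
  (bounds.zip bounds.tail).map (fun p =>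
    (PySem.List.slice lines (some (p.1 + 1)) (some p.2)).foldl
      (fun s line => PySem.Set.update s (line.toList.map (fun c => String.mk [c])))
      PySem.Set.empty)

-- ===== PRECONDITION & SPEC =====
def Spec_group_questions (lines : List String) (out : List (List String)) : Prop := out = group_questions_alt lines
instance (lines : List String) (out : List (List String)) : Decidable (Spec_group_questions lines out) := by unfold Spec_group_questions; infer_instance

-- ===== CLAIM (what is proved, stated in full; the proofs are below) =====
def Claim_equal_group_questions : Prop := ∀ (lines : List String), Dom_group_questions lines → Spec_group_questions lines (group_questions lines)

-- ===== LEMMAS AND PROOFS =====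

-- the union set of one group, as both ports compute it line by line
def pvSetOf (g : List String) : List String :=
  g.foldl (fun s line => PySem.Set.update s (line.toList.map (fun c => String.mk [c])))
    PySem.Set.empty

-- reference grouping: split the line list at blank lines, front recursion
def pvG : List String → List (List String)
  | [] => [[]]
  | l :: ls =>
    if l = "" then [] :: pvG ls
    else
      match pvG ls with
      | [] => [[l]]
      | g :: gs => (l :: g) :: gs

theorem pvG_ne_nil (ls : List String) : pvG ls ≠ [] := by
  cases ls with
  | nil => simp [pvG]
  | cons l ls =>
    simp only [pvG]
    split
    · simp
    · split <;> simp

def pvCons (cur : List String) : List (List String) → List (List String)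
  | [] => [cur]
  | g :: gs => (cur ++ g) :: gs

theorem pvSetOf_nil : pvSetOf [] = PySem.Set.empty := rfl

theorem pvSetOf_concat (g : List String) (line : String) :
    pvSetOf (g ++ [line])
      = PySem.Set.update (pvSetOf g) (line.toList.map (fun c => String.mk [c])) := by
  simp [pvSetOf]

-- A's loop invariant against the reference grouping
theorem pvAloop (ls : List String) :
    ∀ (pre : List (List String)) (cur : List String),
      (let r := ls.foldl
          (fun (st : List (List String) × List String) line =>
            if line = "" then (st.1 ++ [st.2], PySem.Set.empty)
            else (st.1, PySem.Set.update st.2 (line.toList.map (fun c => String.mk [c]))))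
          (pre.map pvSetOf, pvSetOf cur)
       r.1 ++ [r.2])
      = (pre ++ pvCons cur (pvG ls)).map pvSetOf := by
  induction ls with
  | nil => intro pre cur; simp [pvG, pvCons]
  | cons l ls ih =>
    intro pre cur
    by_cases h : l = ""
    · subst h
      obtain ⟨g, gs, hg⟩ := List.exists_cons_of_ne_nil (pvG_ne_nil ls)
      have h2 := ih (pre ++ [cur]) []
      simp only [List.map_append, List.map_cons, List.map_nil, pvSetOf_nil] at h2
      have hgg : pvG ("" :: ls) = [] :: pvG ls := by simp [pvG]
      simp only [List.foldl_cons, reduceIte, hgg]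
      simpa [pvCons, hg, pvSetOf_nil] using h2
    · have h2 := ih pre (cur ++ [l])
      rw [pvSetOf_concat] at h2
      simp only [List.foldl_cons, if_neg h]
      rw [h2, pvG, if_neg h]
      cases hg : pvG ls with
      | nil => exact absurd hg (pvG_ne_nil ls)
      | cons g gs => simp [pvCons]

-- ===== B side: the slice between consecutive bounds is the reference group =====

def pvBlanks (ls : List String) : List Int :=
  ((PySem.List.enumerate ls 0).filter (fun p => p.2 = "")).map (fun p => p.1)

def pvBounds (ls : List String) : List Int :=
  [(-1 : Int)] ++ pvBlanks ls ++ [(ls.length : Int)]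

theorem pvEnumerate_shift {α : Type} (ls : List α) :
    ∀ s : Int, PySem.List.enumerate ls (s + 1)
      = (PySem.List.enumerate ls s).map (fun p => (p.1 + 1, p.2)) := by
  induction ls with
  | nil => intro s; simp [PySem.List.enumerate_nil]
  | cons x xs ih =>
    intro s
    rw [PySem.List.enumerate_cons, PySem.List.enumerate_cons, List.map_cons,
      show s + 1 + 1 = (s + 1) + 1 from rfl, ih (s + 1)]

theorem pvBlanks_cons (l : String) (ls : List String) :
    pvBlanks (l :: ls)
      = (if l = "" then [(0 : Int)] else []) ++ (pvBlanks ls).map (· + 1) := by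
  rw [pvBlanks, PySem.List.enumerate_cons, pvEnumerate_shift ls 0, List.filter_cons]
  by_cases h : l = "" <;> simp [h, pvBlanks, List.filter_map, Function.comp_def]

theorem pvBlanks_nonneg (ls : List String) : ∀ b ∈ pvBlanks ls, 0 ≤ b := by
  induction ls with
  | nil => simp [pvBlanks, PySem.List.enumerate_nil]
  | cons l ls ih =>
    intro b hb
    rw [pvBlanks_cons] at hb
    rcases List.mem_append.mp hb with h | h
    · split at h <;> simp_all
    · obtain ⟨a, ha, rfl⟩ := List.mem_map.mp h
      have := ih a ha; omega

def pvPairs (bs : List Int) : List (Int × Int) := bs.zip bs.tail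

theorem pvPairs_map (f : Int → Int) (bs : List Int) :
    pvPairs (bs.map f) = (pvPairs bs).map (fun p => (f p.1, f p.2)) := by
  simp [pvPairs, ← List.map_tail, List.zip_map, Prod.map]

-- shifting a slice across a cons, for the nonnegative bounds the algorithm uses
theorem pvSlice_shift {α : Type} (x : α) (xs : List α) (a b : Int)
    (ha : 0 ≤ a) (hb : 0 ≤ b) :
    PySem.List.slice (x :: xs) (some (a + 1)) (some (b + 1))
      = PySem.List.slice xs (some a) (some b) := by
  rw [PySem.List.slice_toNat _ (by omega) (by omega), PySem.List.slice_toNat _ ha hb]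
  rw [show (a + 1).toNat = a.toNat + 1 by omega, show (b + 1).toNat = b.toNat + 1 by omega]
  simp

-- expanding the head of a slice that starts at the front
theorem pvSlice_head {α : Type} (x : α) (xs : List α) (b : Int) (hb : 0 ≤ b) :
    PySem.List.slice (x :: xs) (some ((-1 : Int) + 1)) (some (b + 1))
      = x :: PySem.List.slice (x :: xs) (some ((0 : Int) + 1)) (some (b + 1)) := by
  rw [PySem.List.slice_toNat _ (by omega) (by omega), PySem.List.slice_toNat _ (by omega) (by omega)]
  rw [show ((-1 : Int) + 1).toNat = 0 by omega, show ((0 : Int) + 1).toNat = 1 by omega,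
    show (b + 1).toNat = b.toNat + 1 by omega]
  simp

def pvSegs (ls : List String) : List (List String) :=
  (pvPairs (pvBounds ls)).map (fun p => PySem.List.slice ls (some (p.1 + 1)) (some p.2))

theorem pvBounds_cons_form (ls : List String) :
    ∃ b0 bt, pvBlanks ls ++ [(ls.length : Int)] = b0 :: bt ∧ 0 ≤ b0 ∧ ∀ b ∈ bt, 0 ≤ b := by
  cases h : pvBlanks ls with
  | nil =>
    exact ⟨(ls.length : Int), [], by simp, by positivity, by simp⟩
  | cons a t =>
    refine ⟨a, t ++ [(ls.length : Int)], by simp, ?_, ?_⟩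
    · exact pvBlanks_nonneg ls a (by simp [h])
    · intro b hb
      rcases List.mem_append.mp hb with h' | h'
      · exact pvBlanks_nonneg ls b (by simp [h, h'])
      · simp at h'; omega

theorem pvSegs_eq (ls : List String) : pvSegs ls = pvG ls := by
  induction ls with
  | nil => decide
  | cons l ls ih =>
    obtain ⟨b0, bt, hB, hb0, hbt⟩ := pvBounds_cons_form ls
    have hBnds : pvBounds ls = -1 :: b0 :: bt := by
      rw [pvBounds, ← hB]; simp
    have hBmap : (pvBounds ls).map (· + 1) = (0 : Int) :: (b0 + 1) :: bt.map (· + 1) := by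
      rw [hBnds]; norm_num
    have hlen : (((l :: ls).length : Nat) : Int) = (ls.length : Int) + 1 := by
      push_cast [List.length_cons]; ring
    -- boundaries of l :: ls are the shifted boundaries of ls (plus a 0 if l is blank)
    have hKey : pvBlanks (l :: ls) ++ [((l :: ls).length : Int)]
        = (if l = "" then [(0 : Int)] else []) ++ (b0 + 1) :: bt.map (· + 1) := by
      rw [pvBlanks_cons, hlen, List.append_assoc]
      rw [show (pvBlanks ls).map (· + 1) ++ [(ls.length : Int) + 1]
            = (pvBlanks ls ++ [(ls.length : Int)]).map (· + 1) by simp]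
      rw [hB, List.map_cons]
    -- shifting all pairs across the cons gives exactly the segments of ls
    have hshift : (pvPairs ((pvBounds ls).map (· + 1))).map
          (fun p => PySem.List.slice (l :: ls) (some (p.1 + 1)) (some p.2))
        = pvSegs ls := by
      rw [pvPairs_map, List.map_map]
      apply List.map_congr_left
      intro p hp
      have hmem := List.of_mem_zip hp
      have hp1 : -1 ≤ p.1 := by
        have h1 := hmem.1
        rw [hBnds] at h1
        rcases List.mem_cons.mp h1 with h | h
        · omega
        · rcases List.mem_cons.mp h with h | h
          · omega
          · have := hbt _ h; omega
      have hp2 : 0 ≤ p.2 := by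
        have h2 := hmem.2
        rw [hBnds, List.tail_cons] at h2
        rcases List.mem_cons.mp h2 with h | h
        · omega
        · have := hbt _ h; omega
      show PySem.List.slice (l :: ls) (some (p.1 + 1 + 1)) (some (p.2 + 1))
          = PySem.List.slice ls (some (p.1 + 1)) (some p.2)
      exact pvSlice_shift l ls (p.1 + 1) p.2 (by omega) hp2
    rw [ih] at hshift
    by_cases h : l = ""
    · subst h
      have hbounds : pvBounds ("" :: ls) = (-1 : Int) :: (0 : Int) :: (b0 + 1) :: bt.map (· + 1) := by
        rw [show pvBounds ("" :: ls)
              = -1 :: (pvBlanks ("" :: ls) ++ [((("" : String) :: ls).length : Int)]) by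
            simp [pvBounds]]
        rw [hKey]; simp
      rw [pvSegs, hbounds, pvPairs, List.tail_cons, List.zip_cons_cons, List.map_cons]
      have hfirst : PySem.List.slice ("" :: ls) (some ((-1 : Int) + 1)) (some 0) = [] := by
        rw [PySem.List.slice_toNat _ (by omega) (by omega)]; simp
      rw [show (((-1 : Int), (0 : Int)).1 + 1) = (-1 : Int) + 1 from rfl]
      rw [hfirst]
      rw [show ((0 : Int) :: (b0 + 1) :: bt.map (· + 1)).zip ((b0 + 1) :: bt.map (· + 1))
            = pvPairs ((pvBounds ls).map (· + 1)) by rw [hBmap, pvPairs, List.tail_cons]]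
      rw [hshift]
      simp [pvG]
    · have hbounds : pvBounds (l :: ls) = (-1 : Int) :: (b0 + 1) :: bt.map (· + 1) := by
        rw [show pvBounds (l :: ls)
              = -1 :: (pvBlanks (l :: ls) ++ [((l :: ls).length : Int)]) by simp [pvBounds]]
        rw [hKey, if_neg h, List.nil_append]
      rw [pvSegs, hbounds, pvPairs, List.tail_cons]
      simp only [List.zip_cons_cons, List.map_cons]
      rw [hBmap, pvPairs, List.tail_cons] at hshift
      simp only [List.zip_cons_cons, List.map_cons] at hshift
      cases hg : pvG ls with
      | nil => exact absurd hg (pvG_ne_nil ls)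
      | cons g gs =>
        rw [hg, List.cons.injEq] at hshift
        obtain ⟨h1, h2⟩ := hshift
        rw [h2]
        have hhd : PySem.List.slice (l :: ls) (some ((-1 : Int) + 1)) (some (b0 + 1)) = l :: g := by
          rw [pvSlice_head l ls b0 hb0, h1]
        rw [hhd, pvG, if_neg h, hg]

-- combining: A equals map pvSetOf over the reference grouping
theorem pvA_eq (lines : List String) : group_questions lines = (pvG lines).map pvSetOf := by
  have h := pvAloop lines [] []
  obtain ⟨g, gs, hg⟩ := List.exists_cons_of_ne_nil (pvG_ne_nil lines)
  simp only [List.map_nil, List.nil_append, pvSetOf_nil, pvCons] at h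
  rw [group_questions]
  rw [show (PySem.Set.empty : List String) = pvSetOf [] from rfl] at h ⊢
  rw [h, hg]

-- B equals map pvSetOf over the segments
theorem pvB_eq (lines : List String) : group_questions_alt lines = (pvSegs lines).map pvSetOf := by
  rw [group_questions_alt, pvSegs, List.map_map]
  rfl

-- ===== VERDICT (by name: the statement is the Claim_ definition above) =====
theorem group_questions_spec : Claim_equal_group_questions := by
  intro lines _
  show group_questions lines = group_questions_alt lines
  rw [pvA_eq, pvB_eq, pvSegs_eq]
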